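-- pv_equiv track=rewrite | github.com/carlkma/esc180_coursework | misc/script/civ_diagrams.py | generate_sfd
-- ===== SOURCE A (Python) =====
-- D_TO_RIGHT_SUPPORT = 550+510
--
-- def generate_sfd(point_loads, reaction_forces):
-- 	point_loads.append((0, reaction_forces[0]))
-- 	point_loads.append((D_TO_RIGHT_SUPPORT, reaction_forces[1]))
-- 	forces = sorted(point_loads)
-- 	sfd = [(0,0)]
-- 	sfd.append(forces[0])
-- 	for i in range(1, len(forces)):
-- 		sfd.append((forces[i][0], sfd[-1][1]))
-- 		sfd.append((forces[i][0], forces[i][1] + sfd[-1][1]))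
-- 	return sfd
-- ===== SOURCE B (Python) =====
-- D_TO_RIGHT_SUPPORT = 550+510
--
-- def generate_sfd(point_loads, reaction_forces):
-- 	# same observable mutation as A: the two reaction loads are appended to point_loads
-- 	point_loads.append((0, reaction_forces[0]))
-- 	point_loads.append((D_TO_RIGHT_SUPPORT, reaction_forces[1]))
-- 	forces = sorted(point_loads)
-- 	# build the diagram BACK-TO-FRONT: start from the total shear and walk the
-- 	# sorted loads in reverse, subtracting each load, then reverse the output.
-- 	c = sum(y for _, y in forces)
-- 	out = []
-- 	for x, y in reversed(forces[1:]):
-- 		out.append((x, c))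
-- 		c -= y
-- 		out.append((x, c))
-- 	out.append((forces[0][0], c))
-- 	out.append((0, 0))
-- 	out.reverse()
-- 	return out
-- ===== Notes on version B (the rewrite author's own statement) =====
-- stated objective: alternative
-- what changed: B builds the diagram back-to-front: it computes the total shear once, walks the sorted loads in reverse subtracting each load from a suffix-sum accumulator while emitting vertices, and reverses the output, instead of A's forward pass that grows the diagram by reading back its own last element sfd[-1].
import Mathlib
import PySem

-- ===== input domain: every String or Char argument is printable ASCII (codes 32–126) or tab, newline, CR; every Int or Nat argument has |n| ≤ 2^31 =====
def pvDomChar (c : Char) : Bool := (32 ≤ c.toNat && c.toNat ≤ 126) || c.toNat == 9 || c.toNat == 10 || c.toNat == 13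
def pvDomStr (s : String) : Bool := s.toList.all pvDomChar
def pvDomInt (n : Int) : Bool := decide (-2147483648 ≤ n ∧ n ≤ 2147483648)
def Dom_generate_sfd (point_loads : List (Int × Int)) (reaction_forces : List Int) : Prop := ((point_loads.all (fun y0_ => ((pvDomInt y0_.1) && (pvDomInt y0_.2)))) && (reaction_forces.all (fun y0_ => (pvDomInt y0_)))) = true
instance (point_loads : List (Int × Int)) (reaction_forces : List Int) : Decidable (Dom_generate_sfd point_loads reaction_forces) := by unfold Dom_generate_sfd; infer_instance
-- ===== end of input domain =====

-- B builds the diagram back-to-front from the total shear, subtracting loads in a reverse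
-- walk, instead of A's forward pass reading back sfd[-1] (objective: alternative decomposition).
-- Both A and B mutate point_loads identically (two appends); the theorems are about the return value.

-- ===== PORT A =====
-- the loop: for i in range(1, len(forces)): append (x_i, sfd[-1][1]); append (x_i, forces[i][1] + sfd[-1][1])
def sfdLoopA : List (Int × Int) → List (Int × Int) → List (Int × Int)
  | sfd, [] => sfd
  | sfd, (x, y) :: rest =>
      let sfd1 := sfd ++ [(x, (sfd.getLast?.getD (0, 0)).2)]
      let sfd2 := sfd1 ++ [(x, y + (sfd1.getLast?.getD (0, 0)).2)]
      sfdLoopA sfd2 rest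

def generate_sfd (point_loads : List (Int × Int)) (reaction_forces : List Int) : List (Int × Int) :=
  match reaction_forces with               -- rf[0], rf[1]: IndexError (excluded by Pre_) unless rf has ≥ 2 elements
  | r0 :: r1 :: _ =>
      let pl1 := point_loads ++ [(0, r0)]
      let pl2 := pl1 ++ [(1060, r1)]
      let forces := PySem.List.sorted2 pl2 Prod.fst Prod.snd   -- sorted(point_loads): lexicographic on the pairs
      match forces with
      | [] => [(0, 0)]                    -- unreachable: forces has ≥ 2 elements
      | f0 :: rest => sfdLoopA ([(0, 0)] ++ [f0]) rest
  | _ => []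

-- ===== PORT B =====
-- sum(y for _, y in forces)
def sumYB : List (Int × Int) → Int
  | [] => 0
  | (_, y) :: r => y + sumYB r

-- the reverse-walk loop of Source B: for x, y in reversed(forces[1:]): append (x,c); c -= y; append (x,c)
def revLoopB : List (Int × Int) → Int → List (Int × Int) → List (Int × Int) × Int
  | [], c, out => (out, c)
  | (x, y) :: rest, c, out => revLoopB rest (c - y) (out ++ [(x, c), (x, c - y)])

def generate_sfd_alt (point_loads : List (Int × Int)) (reaction_forces : List Int) : List (Int × Int) :=
  match (PySem.List.pyGet? reaction_forces 0).bind
        (fun r0 => (PySem.List.pyGet? reaction_forces 1).map (fun r1 => (r0, r1))) with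
  | some (r0, r1) =>
      let pl1 := point_loads ++ [(0, r0)]
      let pl2 := pl1 ++ [(1060, r1)]
      match PySem.List.sorted2 pl2 Prod.fst Prod.snd with
      | [] => []                          -- unreachable: forces has ≥ 2 elements
      | f0 :: rest =>
          let total := sumYB (f0 :: rest)
          let p := revLoopB rest.reverse total []
          (p.1 ++ [(f0.1, p.2), (0, 0)]).reverse
  | none => []

-- ===== PRECONDITION & SPEC =====
-- Pre_ excludes only the inputs where Python A raises IndexError (fewer than two reaction forces).
def Pre_generate_sfd (point_loads : List (Int × Int)) (reaction_forces : List Int) : Prop :=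
  2 ≤ reaction_forces.length
instance (point_loads : List (Int × Int)) (reaction_forces : List Int) : Decidable (Pre_generate_sfd point_loads reaction_forces) := by unfold Pre_generate_sfd; infer_instance

def pvWitness_generate_sfd : (List (Int × Int)) × List Int := ([(200, -5), (700, 3)], [10, 7])

def Spec_generate_sfd (point_loads : List (Int × Int)) (reaction_forces : List Int) (out : List (Int × Int)) : Prop := out = generate_sfd_alt point_loads reaction_forces
instance (point_loads : List (Int × Int)) (reaction_forces : List Int) (out : List (Int × Int)) : Decidable (Spec_generate_sfd point_loads reaction_forces out) := by unfold Spec_generate_sfd; infer_instance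

-- ===== CLAIM =====
def Claim_equal_generate_sfd : Prop := ∀ (point_loads : List (Int × Int)) (reaction_forces : List Int), Dom_generate_sfd point_loads reaction_forces → Pre_generate_sfd point_loads reaction_forces → Spec_generate_sfd point_loads reaction_forces (generate_sfd point_loads reaction_forces)

-- ===== LEMMAS AND PROOFS =====

-- common closed form: the vertex-pair tail with running cumulative sum c
def tableTail : List (Int × Int) → Int → List (Int × Int)
  | [], _ => []
  | (x, y) :: rest, c => (x, c) :: (x, y + c) :: tableTail rest (y + c)

-- the pure shape of revLoopB's output (vertices emitted while subtracting)
def revTail : List (Int × Int) → Int → List (Int × Int)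
  | [], _ => []
  | (x, y) :: rest, c => (x, c) :: (x, c - y) :: revTail rest (c - y)

theorem sfdLoopA_eq (forces : List (Int × Int)) :
    ∀ (sfd : List (Int × Int)) (c : Int), (sfd.getLast?.getD (0, 0)).2 = c →
    sfdLoopA sfd forces = sfd ++ tableTail forces c := by
  induction forces with
  | nil => intro sfd c _; simp [sfdLoopA, tableTail]
  | cons f rest ih =>
      intro sfd c hc
      obtain ⟨x, y⟩ := f
      simp only [sfdLoopA, tableTail]
      rw [ih _ (y + c) (by simpa using hc)]
      simp [hc]

theorem revLoopB_eq (l : List (Int × Int)) :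
    ∀ (c : Int) (out : List (Int × Int)),
    revLoopB l c out = (out ++ revTail l c, c - sumYB l) := by
  induction l with
  | nil => intro c out; simp [revLoopB, revTail, sumYB]
  | cons f rest ih =>
      intro c out
      obtain ⟨x, y⟩ := f
      simp only [revLoopB, revTail, sumYB]
      rw [ih]
      refine Prod.ext (by simp) (by omega)

theorem sumYB_append (a b : List (Int × Int)) : sumYB (a ++ b) = sumYB a + sumYB b := by
  induction a with
  | nil => simp [sumYB]
  | cons f r ih => obtain ⟨x, y⟩ := f; simp [sumYB, ih]; ring

theorem sumYB_reverse (l : List (Int × Int)) : sumYB l.reverse = sumYB l := by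
  induction l with
  | nil => rfl
  | cons f r ih =>
      obtain ⟨x, y⟩ := f
      simp [List.reverse_cons, sumYB_append, sumYB, ih]; ring

theorem revTail_append (a b : List (Int × Int)) :
    ∀ c, revTail (a ++ b) c = revTail a c ++ revTail b (c - sumYB a) := by
  induction a with
  | nil => intro c; simp [revTail, sumYB]
  | cons f r ih =>
      intro c
      obtain ⟨x, y⟩ := f
      simp only [List.cons_append, revTail, sumYB, ih]
      have : c - y - sumYB r = c - (y + sumYB r) := by omega
      rw [this]

theorem revTail_reverse (l : List (Int × Int)) :
    ∀ c, (revTail l.reverse (c + sumYB l)).reverse = tableTail l c := by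
  induction l with
  | nil => intro c; simp [revTail, tableTail]
  | cons f r ih =>
      intro c
      obtain ⟨x, y⟩ := f
      have hs : sumYB ((x, y) :: r) = y + sumYB r := rfl
      rw [List.reverse_cons, revTail_append, hs]
      have h1 : c + (y + sumYB r) - sumYB r.reverse = c + y := by
        rw [sumYB_reverse]; omega
      have h2 : c + (y + sumYB r) = (c + y) + sumYB r := by omega
      rw [h1, h2]
      simp only [revTail, List.reverse_append, List.reverse_cons, List.reverse_nil]
      have h3 : c + y - y = c := by omega
      rw [h3, ih (c + y)]
      simp [tableTail, add_comm]

-- ===== VERDICT =====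
theorem generate_sfd_spec : Claim_equal_generate_sfd := by
  intro point_loads reaction_forces _ hpre
  unfold Spec_generate_sfd generate_sfd generate_sfd_alt
  match reaction_forces, hpre with
  | r0 :: r1 :: rtl, _ =>
      have h0 : PySem.List.pyGet? (r0 :: r1 :: rtl) 0 = some r0 := by
        simp [PySem.List.pyGet?, PySem.List.pyIdx?]
        rw [if_pos (by positivity)]
        rfl
      have h1 : PySem.List.pyGet? (r0 :: r1 :: rtl) 1 = some r1 := by
        simp [PySem.List.pyGet?, PySem.List.pyIdx?]
      rw [h0, h1]
      simp only [Option.bind_some, Option.map_some]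
      cases hf : PySem.List.sorted2 (point_loads ++ [(0, r0)] ++ [(1060, r1)]) Prod.fst Prod.snd with
      | nil =>
        exfalso
        have hp := PySem.List.sorted2_perm (point_loads ++ [(0, r0)] ++ [(1060, r1)]) Prod.fst Prod.snd false
        rw [hf] at hp
        have := hp.symm.length_eq
        simp at this
      | cons f0 rest =>
        obtain ⟨x0, y0⟩ := f0
        simp only
        rw [sfdLoopA_eq rest _ y0 (by simp)]
        rw [revLoopB_eq]
        have hs : sumYB ((x0, y0) :: rest) = y0 + sumYB rest := rfl
        rw [hs, sumYB_reverse]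
        have hc : y0 + sumYB rest - sumYB rest = y0 := by omega
        simp only [List.nil_append, List.reverse_append, List.reverse_cons, List.reverse_nil]
        rw [hc, revTail_reverse rest y0]
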